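-- pv_equiv track=rewrite | github.com/bahmanab/AnalyzingRepeatDonors | src/analyze_repeat_donations.py | is_valid_dollar_amount
-- ===== SOURCE A (Python) =====
-- def is_valid_dollar_amount(string_dollar_amount):
--     """
--         Checks if string_dollar_amount is a valid dollar amount.
--         Acceptable examples 1232.10, 1232.1, and 1232. It should have a maximum precision 14 and maximum scale 2.
--         Assumes string_dollar_amount is already stripped from beginning and ending white space characters.
--     :param string_dollar_amount: a string that if correct should represent a dollar amount
--     :return: True if string_dollar_amount is representing a valid dollar amount with scale 2 and precision 14.
--     """
--     if string_dollar_amount in ['', '.']: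
--         return False
--
--     amt_list = string_dollar_amount.split('.')
--     # there should be 1 or 2 string of digits on the sides of '.' for a valid dollar amount
--     if len(amt_list) not in [1, 2]:
--         return False
--
--     # both side of decimal point has only digits or at most one side can be empty
--     if all((c.isdigit() or c == '') for c in amt_list):
--         if len(amt_list) == 2:
--             if len(amt_list[1]) <= 2 and len(amt_list[0]) + len(amt_list[1]) <= 14:
--                 return True
--         else:   # len(amt_list) equals 1
--             if len(amt_list[0]) <= 14:
--                 return True
--     return False
-- ===== SOURCE B (Python) =====
-- def is_valid_dollar_amount(string_dollar_amount):
--     if string_dollar_amount in ('', '.'):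
--         return False
--     dots = 0
--     before = 0
--     after = 0
--     for c in string_dollar_amount:
--         if c == '.':
--             dots += 1
--             if dots > 1:
--                 return False
--         elif c.isdigit():
--             if dots == 0:
--                 before += 1
--             else:
--                 after += 1
--         else:
--             return False
--     if dots == 0:
--         return before <= 14
--     return after <= 2 and before + after <= 14
-- ===== Notes on version B (the rewrite author's own statement) =====
-- stated objective: simpler
-- what changed: Replaced the split-on-dot plus all() pass over the parts with a single character scan that keeps running counters of dots and of digits before/after the dot, rejecting early on a bad character or a second dot.
import Mathlib
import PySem

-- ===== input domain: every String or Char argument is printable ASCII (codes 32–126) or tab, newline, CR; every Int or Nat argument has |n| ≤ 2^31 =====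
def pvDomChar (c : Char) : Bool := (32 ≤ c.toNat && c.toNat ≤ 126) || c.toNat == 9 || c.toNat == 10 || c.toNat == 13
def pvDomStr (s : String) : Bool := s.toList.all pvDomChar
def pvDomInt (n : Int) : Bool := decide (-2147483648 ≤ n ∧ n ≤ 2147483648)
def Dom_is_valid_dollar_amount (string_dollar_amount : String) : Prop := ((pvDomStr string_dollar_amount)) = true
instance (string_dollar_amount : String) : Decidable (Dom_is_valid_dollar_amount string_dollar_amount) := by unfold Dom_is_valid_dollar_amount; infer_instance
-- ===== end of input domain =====

-- B replaces split('.')+all() with a single character scan keeping running dot/digit counters (objective: simpler one-pass decomposition).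

-- ===== PORT A =====
-- s.split('.') is ported as PySem.Chars.splitOn on the code points (sep ≠ ""); parts stay List Char,
-- '' is [], part.isdigit() is Chars.strIsdigit, len is List.length — exact on all inputs.
def is_valid_dollar_amount (string_dollar_amount : String) : Bool :=
  if string_dollar_amount == "" || string_dollar_amount == "." then false
  else
    let amt_list := PySem.Chars.splitOn string_dollar_amount.toList ['.']
    if !(amt_list.length == 1 || amt_list.length == 2) then false
    else if amt_list.all (fun c => PySem.Chars.strIsdigit c || c == []) then
      if amt_list.length == 2 then
        if (amt_list.getD 1 []).length ≤ 2 && (amt_list.getD 0 []).length + (amt_list.getD 1 []).length ≤ 14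
        then true else false
      else
        if (amt_list.getD 0 []).length ≤ 14 then true else false
    else false

-- ===== PORT B =====
-- the for-loop of Source B: early 'return False' is the none state; state = (dots, before, after)
def pvScan : List Char → Nat → Nat → Nat → Option (Nat × Nat × Nat)
  | [], dots, before, after => some (dots, before, after)
  | c :: rest, dots, before, after =>
    if c == '.' then
      if dots + 1 > 1 then none else pvScan rest (dots + 1) before after
    else if PySem.Chars.isdigit c then
      if dots == 0 then pvScan rest dots (before + 1) after
      else pvScan rest dots before (after + 1)
    else none

def is_valid_dollar_amount_alt (string_dollar_amount : String) : Bool :=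
  if string_dollar_amount == "" || string_dollar_amount == "." then false
  else
    match pvScan string_dollar_amount.toList 0 0 0 with
    | none => false
    | some (dots, before, after) =>
      if dots == 0 then before ≤ 14 else after ≤ 2 && before + after ≤ 14

-- ===== PRECONDITION & SPEC =====
def Spec_is_valid_dollar_amount (string_dollar_amount : String) (out : Bool) : Prop := out = is_valid_dollar_amount_alt string_dollar_amount
instance (string_dollar_amount : String) (out : Bool) : Decidable (Spec_is_valid_dollar_amount string_dollar_amount out) := by unfold Spec_is_valid_dollar_amount; infer_instance

-- ===== CLAIM (what is proved, stated in full; the proofs are below) =====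
def Claim_equal_is_valid_dollar_amount : Prop := ∀ (string_dollar_amount : String), Dom_is_valid_dollar_amount string_dollar_amount → Spec_is_valid_dollar_amount string_dollar_amount (is_valid_dollar_amount string_dollar_amount)

-- ===== LEMMAS AND PROOFS =====

theorem go_nodot (fuel : Nat) (l cur : List Char) (acc : List (List Char))
    (h : '.' ∉ l) :
    PySem.Chars.splitOn.go ['.'] fuel l cur acc = acc.reverse ++ [cur.reverse ++ l] := by
  induction fuel generalizing l cur acc with
  | zero => simp [PySem.Chars.splitOn.go]
  | succ n ih =>
    cases l with
    | nil => simp [PySem.Chars.splitOn.go]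
    | cons c rest =>
      have hc : c ≠ '.' := fun hh => h (hh ▸ List.mem_cons_self ..)
      have hr : '.' ∉ rest := fun hh => h (List.mem_cons_of_mem _ hh)
      simp [PySem.Chars.splitOn.go, List.isPrefixOf, Ne.symm hc, ih rest (c :: cur) acc hr]

theorem go_pre (a : List Char) (ha : '.' ∉ a) (fuel : Nat) (b cur : List Char) (acc : List (List Char)) :
    PySem.Chars.splitOn.go ['.'] (a.length + 1 + fuel) (a ++ '.' :: b) cur acc
      = PySem.Chars.splitOn.go ['.'] fuel b [] ((cur.reverse ++ a) :: acc) := by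
  induction a generalizing cur with
  | nil =>
    have h1 : ([] : List Char).length + 1 + fuel = fuel + 1 := by simp; omega
    rw [h1]
    simp [PySem.Chars.splitOn.go, List.isPrefixOf]
  | cons c a' ih =>
    have ha' : '.' ∉ a' := fun hh => ha (List.mem_cons_of_mem _ hh)
    have hc : c ≠ '.' := fun hh => ha (hh ▸ List.mem_cons_self ..)
    have h1 : (c :: a').length + 1 + fuel = (a'.length + 1 + fuel) + 1 := by simp; omega
    rw [h1]
    simp only [List.cons_append, PySem.Chars.splitOn.go]
    rw [if_neg (by simp [List.isPrefixOf, Ne.symm hc])]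
    rw [ih ha' (c :: cur)]
    simp

theorem go_len (fuel : Nat) (l cur : List Char) (acc : List (List Char)) :
    acc.length + 1 ≤ (PySem.Chars.splitOn.go ['.'] fuel l cur acc).length := by
  induction fuel generalizing l cur acc with
  | zero => simp [PySem.Chars.splitOn.go]
  | succ n ih =>
    cases l with
    | nil => simp [PySem.Chars.splitOn.go]
    | cons c rest =>
      simp only [PySem.Chars.splitOn.go]
      split
      · exact le_trans (by simp) (ih _ _ _)
      · exact ih rest (c :: cur) acc

theorem splitOn_nodot (cs : List Char) (h : '.' ∉ cs) :
    PySem.Chars.splitOn cs ['.'] = [cs] := by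
  simp [PySem.Chars.splitOn, go_nodot _ _ _ _ h]

theorem splitOn_onedot (a b : List Char) (ha : '.' ∉ a) (hb : '.' ∉ b) :
    PySem.Chars.splitOn (a ++ '.' :: b) ['.'] = [a, b] := by
  have hl : (a ++ '.' :: b).length + 1 = a.length + 1 + (b.length + 1) := by simp; omega
  simp only [PySem.Chars.splitOn, hl, go_pre a ha, go_nodot _ _ _ _ hb]
  simp

theorem splitOn_twodots (a a2 b2 : List Char) (ha : '.' ∉ a) (ha2 : '.' ∉ a2) :
    3 ≤ (PySem.Chars.splitOn (a ++ '.' :: (a2 ++ '.' :: b2)) ['.']).length := by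
  have hl : (a ++ '.' :: (a2 ++ '.' :: b2)).length + 1
      = a.length + 1 + (a2.length + 1 + (b2.length + 1)) := by simp; omega
  simp only [PySem.Chars.splitOn, hl, go_pre a ha, go_pre a2 ha2, List.reverse_nil,
    List.nil_append]
  have h := go_len (b2.length + 1) b2 [] [a2, a]
  simp only [List.length_cons, List.length_nil] at h
  omega

theorem scan_append (xs ys : List Char) (d b a : Nat) :
    pvScan (xs ++ ys) d b a
      = (pvScan xs d b a).bind (fun s => pvScan ys s.1 s.2.1 s.2.2) := by
  induction xs generalizing d b a with
  | nil => simp [pvScan]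
  | cons c rest ih =>
    simp only [List.cons_append, pvScan]
    split_ifs <;> simp [ih]

theorem scan_nodot0 (xs : List Char) (h : '.' ∉ xs) (b : Nat) :
    pvScan xs 0 b 0
      = if xs.all PySem.Chars.isdigit then some (0, b + xs.length, 0) else none := by
  induction xs generalizing b with
  | nil => simp [pvScan]
  | cons c rest ih =>
    have hc : c ≠ '.' := fun hh => h (hh ▸ List.mem_cons_self ..)
    have hr : '.' ∉ rest := fun hh => h (List.mem_cons_of_mem _ hh)
    by_cases hd : PySem.Chars.isdigit c
    · have hstep : pvScan (c :: rest) 0 b 0 = pvScan rest 0 (b + 1) 0 := by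
        simp [pvScan, hc, hd]
      rw [hstep, ih hr]
      by_cases hall : rest.all PySem.Chars.isdigit
      · simp [hall, hd]; omega
      · simp [hall, hd]
    · simp [pvScan, hc, hd]

theorem scan_nodot1 (xs : List Char) (h : '.' ∉ xs) (b a : Nat) :
    pvScan xs 1 b a
      = if xs.all PySem.Chars.isdigit then some (1, b, a + xs.length) else none := by
  induction xs generalizing a with
  | nil => simp [pvScan]
  | cons c rest ih =>
    have hc : c ≠ '.' := fun hh => h (hh ▸ List.mem_cons_self ..)
    have hr : '.' ∉ rest := fun hh => h (List.mem_cons_of_mem _ hh)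
    by_cases hd : PySem.Chars.isdigit c
    · have hstep : pvScan (c :: rest) 1 b a = pvScan rest 1 b (a + 1) := by
        simp [pvScan, hc, hd]
      rw [hstep, ih hr]
      by_cases hall : rest.all PySem.Chars.isdigit
      · simp [hall, hd]; omega
      · simp [hall, hd]
    · simp [pvScan, hc, hd]

theorem scan_dotted (xs : List Char) (h : '.' ∈ xs) (b a : Nat) :
    pvScan xs 1 b a = none := by
  induction xs generalizing b a with
  | nil => cases h
  | cons c rest ih =>
    by_cases hc : c = '.'
    · simp [pvScan, hc]
    · have hr : '.' ∈ rest := by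
        cases List.mem_cons.mp h with
        | inl h1 => exact absurd h1.symm hc
        | inr h1 => exact h1
      by_cases hd : PySem.Chars.isdigit c
      · simp [pvScan, hc, hd, ih hr]
      · simp [pvScan, hc, hd]

theorem first_dot (cs : List Char) (h : '.' ∈ cs) :
    ∃ a b, cs = a ++ '.' :: b ∧ '.' ∉ a := by
  induction cs with
  | nil => cases h
  | cons c rest ih =>
    by_cases hc : c = '.'
    · exact ⟨[], rest, by simp [hc], by simp⟩
    · have hr : '.' ∈ rest := by
        cases List.mem_cons.mp h with
        | inl h1 => exact absurd h1.symm hc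
        | inr h1 => exact h1
      rcases ih hr with ⟨a, b, hab, hna⟩
      exact ⟨c :: a, b, by simp [hab], by simp [Ne.symm hc, hna]⟩

theorem digitall_eq (x : List Char) :
    (PySem.Chars.strIsdigit x || x == []) = x.all PySem.Chars.isdigit := by
  cases x <;> simp [PySem.Chars.strIsdigit]

-- ===== VERDICT (by name: the statement is the Claim_ definition above) =====
theorem is_valid_dollar_amount_spec : Claim_equal_is_valid_dollar_amount := by
  intro s _
  unfold Spec_is_valid_dollar_amount is_valid_dollar_amount is_valid_dollar_amount_alt
  by_cases hg : (s == "" || s == ".") = true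
  · simp [hg]
  · rw [if_neg hg, if_neg hg]
    by_cases hdot : '.' ∈ s.toList
    · rcases first_dot _ hdot with ⟨a, b, hab, hna⟩
      by_cases hdb : '.' ∈ b
      · -- at least three parts: both sides false
        rcases first_dot _ hdb with ⟨a2, b2, hab2, hna2⟩
        rw [hab, hab2]
        have h3 := splitOn_twodots a a2 b2 hna hna2
        rw [if_pos (by simp only [Bool.not_eq_eq_eq_not, Bool.not_true, Bool.or_eq_false_iff,
              beq_eq_false_iff_ne, ne_eq]; omega)]
        rw [scan_append, scan_nodot0 a hna 0]
        by_cases hall : a.all PySem.Chars.isdigit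
        · simp only [hall, if_true, Option.bind_some]
          have hstep : pvScan ('.' :: (a2 ++ '.' :: b2)) 0 (0 + a.length) 0
              = pvScan (a2 ++ '.' :: b2) 1 (0 + a.length) 0 := by
            simp [pvScan]
          rw [hstep, scan_dotted _ (by simp) _ _]
        · rw [if_neg hall]
          rfl
      · -- exactly two parts
        rw [hab, splitOn_onedot a b hna hdb, scan_append, scan_nodot0 a hna 0]
        rw [if_neg (by simp)]
        by_cases hall : a.all PySem.Chars.isdigit
        · simp only [hall, if_true, Option.bind_some]
          have hstep : pvScan ('.' :: b) 0 (0 + a.length) 0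
              = pvScan b 1 (0 + a.length) 0 := by simp [pvScan]
          rw [hstep, scan_nodot1 b hdb]
          by_cases hall2 : b.all PySem.Chars.isdigit
          · have hA : ([a, b].all fun c => PySem.Chars.strIsdigit c || c == []) = true := by
              simp only [List.all_cons, List.all_nil, digitall_eq, hall, hall2, Bool.and_self]
            rw [if_pos hA, if_pos (by simp), if_pos hall2]
            simp only [List.getD, List.getElem?_cons_zero, List.getElem?_cons_succ,
              Option.getD_some]
            simp only [beq_iff_eq, Nat.zero_add, if_neg (by omega : ¬ (1 : Nat) = 0)]
            split <;> simp_all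
          · have hA : ([a, b].all fun c => PySem.Chars.strIsdigit c || c == []) = false := by
              simp only [List.all_cons, List.all_nil, Bool.and_true, digitall_eq, hall, hall2,
                Bool.true_and]
            rw [if_neg (by rw [hA]; simp), if_neg hall2]
        · have hA : ([a, b].all fun c => PySem.Chars.strIsdigit c || c == []) = false := by
            simp only [List.all_cons, List.all_nil, Bool.and_true, digitall_eq, hall,
              Bool.false_and]
          rw [if_neg (by rw [hA]; simp), if_neg hall]
          rfl
    · -- one part
      rw [splitOn_nodot _ hdot, scan_nodot0 _ hdot 0]
      rw [if_neg (by simp)]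
      by_cases hall : s.toList.all PySem.Chars.isdigit
      · have hA : ([s.toList].all fun c => PySem.Chars.strIsdigit c || c == []) = true := by
          simp only [List.all_cons, List.all_nil, Bool.and_true, digitall_eq, hall]
        rw [if_pos hA, if_neg (by simp), if_pos hall]
        simp [List.getD]
      · have hne : s.toList ≠ [] := by
          intro h0
          rw [h0] at hall
          simp at hall
        have hA : ([s.toList].all fun c => PySem.Chars.strIsdigit c || c == []) = false := by
          simp only [List.all_cons, List.all_nil, Bool.and_true, digitall_eq, hall]
        rw [if_neg (by rw [hA]; simp), if_neg hall]
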